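-- pv_equiv track=rewrite | github.com/tzickel/electra_remote_ir | ir/plot.py | seq_to_xy
-- ===== SOURCE A (Python) =====
-- def seq_to_xy(seq):
--     line = [(0, 0)]
--     i = 0
--     for pnt in seq:
--         i += pnt[1]
--         if line[-1][1] == 0:
--             line.append((line[-1][0], 1))
--             line.append((i, 1))
--         else:
--             line.append((line[-1][0], 0))
--             line.append((i, 0))
--     return line
-- ===== SOURCE B (Python) =====
-- def seq_to_xy(seq):
--     # pass 1: prefix sums of the durations
--     xs = [0]
--     t = 0
--     for p in seq:
--         t += p[1]
--         xs.append(t)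
--     # pass 2: emit one horizontal segment per adjacent pair; level is index parity
--     line = [(0, 0)]
--     for k, (a, b) in enumerate(zip(xs, xs[1:])):
--         y = 1 - k % 2
--         line.append((a, y))
--         line.append((b, y))
--     return line
-- ===== Notes on version B (the rewrite author's own statement) =====
-- stated objective: alternative
-- what changed: B first builds the prefix-sum table of durations, then emits the two points per segment from adjacent pairs using index parity for the level, eliminating A's inspect-the-last-appended-point branch.
import Mathlib
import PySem

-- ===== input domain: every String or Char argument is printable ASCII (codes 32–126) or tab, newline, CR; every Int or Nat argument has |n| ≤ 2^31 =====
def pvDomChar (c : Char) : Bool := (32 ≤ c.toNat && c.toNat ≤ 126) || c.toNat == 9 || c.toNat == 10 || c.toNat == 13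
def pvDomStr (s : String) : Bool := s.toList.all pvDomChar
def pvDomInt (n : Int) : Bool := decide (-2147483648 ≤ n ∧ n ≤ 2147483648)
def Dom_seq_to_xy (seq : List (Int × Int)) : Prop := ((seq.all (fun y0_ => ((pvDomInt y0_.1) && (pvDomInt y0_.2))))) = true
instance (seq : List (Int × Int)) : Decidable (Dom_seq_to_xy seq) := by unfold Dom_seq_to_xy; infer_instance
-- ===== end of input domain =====

-- B replaces A's inspect-last-point branch by a prefix-sum table plus index-parity emission ('alternative' decomposition, same cost).

-- ===== PORT A =====
-- line[-1] on the always-nonempty line is ported as getLast! (exact here: line is never empty).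
def seq_to_xy (seq : List (Int × Int)) : List (Int × Int) :=
  (seq.foldl
    (fun (st : List (Int × Int) × Int) pnt =>
      let i := st.2 + pnt.2
      let last := st.1.getLast!
      if last.2 == 0 then
        (st.1 ++ [(last.1, 1), (i, 1)], i)
      else
        (st.1 ++ [(last.1, 0), (i, 0)], i))
    ([(0, 0)], 0)).1

-- ===== PORT B =====
-- pass 1 of Source B: prefix sums (xs without the leading 0)
def seqToXyXs (t : Int) : List (Int × Int) → List Int
  | [] => []
  | p :: rest => (t + p.2) :: seqToXyXs (t + p.2) rest

-- pass 2 of Source B: 'for k, (a, b) in enumerate(zip(xs, xs[1:]))'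
def seqToXyEmit (k : Nat) : List (Int × Int) → List (Int × Int)
  | [] => []
  | (a, b) :: rest =>
    let y : Int := 1 - (k % 2 : Nat)
    (a, y) :: (b, y) :: seqToXyEmit (k + 1) rest

def seq_to_xy_alt (seq : List (Int × Int)) : List (Int × Int) :=
  let xs := 0 :: seqToXyXs 0 seq
  (0, 0) :: seqToXyEmit 0 (xs.zip xs.tail)

-- ===== PRECONDITION & SPEC =====
def Spec_seq_to_xy (seq : List (Int × Int)) (out : List (Int × Int)) : Prop := out = seq_to_xy_alt seq
instance (seq : List (Int × Int)) (out : List (Int × Int)) : Decidable (Spec_seq_to_xy seq out) := by unfold Spec_seq_to_xy; infer_instance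

-- ===== CLAIM (what is proved, stated in full; the proofs are below) =====
def Claim_equal_seq_to_xy : Prop := ∀ (seq : List (Int × Int)), Dom_seq_to_xy seq → Spec_seq_to_xy seq (seq_to_xy seq)

-- ===== LEMMAS AND PROOFS =====

theorem seq_to_xy_getLast!_concat2 (l : List (Int × Int)) (a b : Int × Int) :
    (l ++ [a, b]).getLast! = b := by
  have h : (l ++ [a, b]).getLast? = some b := by
    rw [show l ++ [a, b] = (l ++ [a]) ++ [b] by simp]
    simp
  cases l <;> simp_all

-- loop invariant: after processing k segments with running sum t and output-so-far `line`,
-- A's fold appends exactly B's parity-indexed emission of the remaining segments.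
theorem seq_to_xy_main (seq : List (Int × Int)) :
    ∀ (line : List (Int × Int)) (t : Int) (k : Nat),
      line.getLast! = (t, ((k % 2 : Nat) : Int)) →
      (seq.foldl
        (fun (st : List (Int × Int) × Int) pnt =>
          let i := st.2 + pnt.2
          let last := st.1.getLast!
          if last.2 == 0 then
            (st.1 ++ [(last.1, 1), (i, 1)], i)
          else
            (st.1 ++ [(last.1, 0), (i, 0)], i))
        (line, t)).1
      = line ++ seqToXyEmit k ((t :: seqToXyXs t seq).zip (seqToXyXs t seq)) := by
  induction seq with
  | nil => intro line t k h; simp [seqToXyXs, seqToXyEmit]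
  | cons p rest ih =>
    intro line t k h
    simp only [List.foldl_cons, seqToXyXs, List.zip_cons_cons, seqToXyEmit]
    rcases Nat.even_or_odd k with hk | hk
    · have hk2 : k % 2 = 0 := Nat.even_iff.mp hk
      have hk2' : (k + 1) % 2 = 1 := by omega
      rw [h]
      have := ih (line ++ [(t, 1), (t + p.2, 1)]) (t + p.2) (k + 1)
        (by rw [seq_to_xy_getLast!_concat2, hk2'] ; norm_num)
      simp only [hk2] at this ⊢
      simpa [List.append_assoc] using this
    · have hk2 : k % 2 = 1 := Nat.odd_iff.mp hk
      have hk2' : (k + 1) % 2 = 0 := by omega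
      rw [h]
      have := ih (line ++ [(t, 0), (t + p.2, 0)]) (t + p.2) (k + 1)
        (by rw [seq_to_xy_getLast!_concat2, hk2'] ; norm_num)
      simp only [hk2] at this ⊢
      simpa [List.append_assoc] using this

-- ===== VERDICT (by name: the statement is the Claim_ definition above) =====
theorem seq_to_xy_spec : Claim_equal_seq_to_xy := by
  intro seq _
  unfold Spec_seq_to_xy seq_to_xy seq_to_xy_alt
  rw [seq_to_xy_main seq [(0, 0)] 0 0 (by simp)]
  simp
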